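-- pv_equiv track=rewrite | github.com/Valeogamer/Learn-and-Tasks | 6.Parallel_and_Distributed_Computing/Labs/1.Threads/bitonic_find.py | count_trend_changes
-- ===== SOURCE A (Python) =====
-- def count_trend_changes(arr):
--     if len(arr) < 3:
--         return 0  # Если массив слишком короткий, то нет переключений
--
--     trend = "none"  # Начинаем без тренда
--     trend_changes = 0  # Инициализируем счетчик переключений
--     current_trend_length = 1  # Текущая длина текущего тренда
--
--     for i in range(1, len(arr)):
--         if arr[i] > arr[i - 1]:
--             if trend == "decreasing":
--                 if current_trend_length > 2:
--                     trend_changes += 1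
--                 current_trend_length = 1
--             trend = "increasing"
--             current_trend_length += 1
--         elif arr[i] < arr[i - 1]:
--             if trend == "increasing":
--                 if current_trend_length > 2:
--                     trend_changes += 1
--                 current_trend_length = 1
--             trend = "decreasing"
--             current_trend_length += 1
--
--     return trend_changes
-- ===== SOURCE B (Python) =====
-- def count_trend_changes(arr):
--     if len(arr) < 3:
--         return 0
--     # 1. nonzero trend directions (equal neighbours vanish, as in A)
--     dirs = []
--     for prev, cur in zip(arr, arr[1:]):
--         if cur > prev:
--             dirs.append(1)
--         elif cur < prev:
--             dirs.append(-1)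
--     # 2. run-length-encode into maximal same-direction runs [dir, steps]
--     runs = []
--     for d in dirs:
--         if runs and runs[-1][0] == d:
--             runs[-1][1] += 1
--         else:
--             runs.append([d, 1])
--     # 3. count runs of >= 2 steps, excluding the final run
--     return sum(1 for d, k in runs[:-1] if k >= 2)
-- ===== Notes on version B (the rewrite author's own statement) =====
-- stated objective: alternative
-- what changed: A's single stateful loop (string trend flag, running length, in-loop counter) is replaced by a three-stage pipeline: extract the list of nonzero step directions, run-length-encode it into maximal same-direction runs, then count the non-final runs with at least 2 steps.
import Mathlib
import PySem

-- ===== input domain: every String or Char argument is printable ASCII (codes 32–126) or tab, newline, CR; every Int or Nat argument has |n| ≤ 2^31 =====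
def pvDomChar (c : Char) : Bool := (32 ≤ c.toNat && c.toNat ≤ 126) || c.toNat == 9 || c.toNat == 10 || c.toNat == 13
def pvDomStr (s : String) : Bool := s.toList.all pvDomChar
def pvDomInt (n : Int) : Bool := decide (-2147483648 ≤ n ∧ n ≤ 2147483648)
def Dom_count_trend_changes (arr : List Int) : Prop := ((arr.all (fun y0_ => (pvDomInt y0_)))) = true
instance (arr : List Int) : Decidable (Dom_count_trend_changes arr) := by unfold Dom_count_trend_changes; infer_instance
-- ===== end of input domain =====

-- B replaces A's single stateful string-trend loop by a three-stage decomposition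
-- (direction list, run-length encoding, count of non-final runs of >= 2 steps); objective: alternative.


-- ===== PORT A =====
-- state = (trend, trend_changes, current_trend_length); body of A's for-loop over i
def pvStepA (arr : List Int) (st : String × Int × Int) (i : Int) : String × Int × Int :=
  let trend := st.1
  let changes := st.2.1
  let cur := st.2.2
  let ai := PySem.List.pyGetD arr i 0        -- arr[i]; i always in range here
  let ap := PySem.List.pyGetD arr (i - 1) 0  -- arr[i-1]
  if ai > ap then
    let p := if trend = "decreasing" then
               (if cur > 2 then changes + 1 else changes, (1 : Int))
             else (changes, cur)
    ("increasing", p.1, p.2 + 1)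
  else if ai < ap then
    let p := if trend = "increasing" then
               (if cur > 2 then changes + 1 else changes, (1 : Int))
             else (changes, cur)
    ("decreasing", p.1, p.2 + 1)
  else (trend, changes, cur)

def count_trend_changes (arr : List Int) : Int :=
  if arr.length < 3 then 0
  else ((PySem.List.pyRange 1 (arr.length : Int) 1).foldl (pvStepA arr) ("none", 0, 1)).2.1

-- ===== PORT B =====
-- stage 1: directions of the nonzero steps (zip(arr, arr[1:]); arr[1:] = arr.drop 1, PySem.List.slice_from_one)
def pvDirs (arr : List Int) : List Int :=
  (arr.zip (arr.drop 1)).foldl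
    (fun ds pc => if pc.2 > pc.1 then ds ++ [1] else if pc.2 < pc.1 then ds ++ [-1] else ds) []

-- stage 2: run-length encoding step (append, or bump the last run's count)
def pvAddRun (runs : List (Int × Int)) (d : Int) : List (Int × Int) :=
  match runs.getLast? with
  | some (d0, k) => if d0 = d then runs.dropLast ++ [(d0, k + 1)] else runs ++ [(d, 1)]
  | none => [(d, 1)]

def count_trend_changes_alt (arr : List Int) : Int :=
  if arr.length < 3 then 0
  else
    let runs := (pvDirs arr).foldl pvAddRun []
    ((runs.dropLast.filter (fun p => 2 ≤ p.2)).length : Int)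

-- ===== PRECONDITION & SPEC =====
def Spec_count_trend_changes (arr : List Int) (out : Int) : Prop := out = count_trend_changes_alt arr
instance (arr : List Int) (out : Int) : Decidable (Spec_count_trend_changes arr out) := by unfold Spec_count_trend_changes; infer_instance

-- ===== CLAIM (what is proved, stated in full; the proofs are below) =====
def Claim_equal_count_trend_changes : Prop := ∀ (arr : List Int), Dom_count_trend_changes arr → Spec_count_trend_changes arr (count_trend_changes arr)

-- ===== LEMMAS AND PROOFS =====

-- A's loop body on the pair (arr[i-1], arr[i])
def pvStepPair (st : String × Int × Int) (pc : Int × Int) : String × Int × Int :=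
  let trend := st.1
  let changes := st.2.1
  let cur := st.2.2
  if pc.2 > pc.1 then
    let p := if trend = "decreasing" then
               (if cur > 2 then changes + 1 else changes, (1 : Int))
             else (changes, cur)
    ("increasing", p.1, p.2 + 1)
  else if pc.2 < pc.1 then
    let p := if trend = "increasing" then
               (if cur > 2 then changes + 1 else changes, (1 : Int))
             else (changes, cur)
    ("decreasing", p.1, p.2 + 1)
  else (trend, changes, cur)

-- A's loop body on a direction d ∈ {1, -1}
def pvStepDir (st : String × Int × Int) (d : Int) : String × Int × Int :=
  let trend := st.1
  let changes := st.2.1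
  let cur := st.2.2
  if d = 1 then
    let p := if trend = "decreasing" then
               (if cur > 2 then changes + 1 else changes, (1 : Int))
             else (changes, cur)
    ("increasing", p.1, p.2 + 1)
  else
    let p := if trend = "increasing" then
               (if cur > 2 then changes + 1 else changes, (1 : Int))
             else (changes, cur)
    ("decreasing", p.1, p.2 + 1)

def pvSgn (pc : Int × Int) : Option Int :=
  if pc.2 > pc.1 then some 1 else if pc.2 < pc.1 then some (-1) else none

-- projections of the run list that mirror A's state
def pvTrendStr (runs : List (Int × Int)) : String :=
  match runs.getLast? with
  | none => "none"
  | some (d, _) => if d = 1 then "increasing" else "decreasing"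

def pvLastLen (runs : List (Int × Int)) : Int :=
  match runs.getLast? with
  | none => 1
  | some (_, k) => k + 1

def pvCnt (runs : List (Int × Int)) : Int :=
  ((runs.filter (fun p => 2 ≤ p.2)).length : Int)

lemma pvMapRange (arr : List Int) :
    (PySem.List.pyRange 1 (arr.length : Int) 1).map
      (fun i => ((PySem.List.pyGetD arr (i - 1) 0 : Int), (PySem.List.pyGetD arr i 0 : Int)))
      = arr.zip (arr.drop 1) := by
  apply List.ext_getElem
  · simp [PySem.List.length_pyRange_one]
  · intro k h1 h2
    have hk : (k : Int) < (arr.length : Int) - 1 := by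
      have := h1
      simp [PySem.List.length_pyRange_one] at this
      omega
    have hlen : k + 1 < arr.length := by exact_mod_cast by omega
    have hk' : k < arr.length := by omega
    have e2 : (1 : Int) + (k : Int) = (((k + 1 : Nat)) : Int) := by push_cast; ring
    have e1 : (((k + 1 : Nat)) : Int) - 1 = ((k : Nat) : Int) := by push_cast; ring
    simp only [List.getElem_map, PySem.List.getElem_pyRange_one, e2, e1,
      PySem.List.pyGetD_natCast, List.getElem_zip, Prod.mk.injEq]
    constructor
    · simp [List.getD, List.getElem?_eq_getElem hk']
    · simp [List.getD, List.getElem?_eq_getElem hlen]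

lemma pvFoldA_pairs (arr : List Int) (st : String × Int × Int) :
    (PySem.List.pyRange 1 (arr.length : Int) 1).foldl (pvStepA arr) st
      = (arr.zip (arr.drop 1)).foldl pvStepPair st := by
  rw [← pvMapRange arr, List.foldl_map]
  rfl

lemma pvDirs_append (ps : List (Int × Int)) :
    ∀ ds : List Int,
      ps.foldl (fun ds pc => if pc.2 > pc.1 then ds ++ [1] else if pc.2 < pc.1 then ds ++ [-1] else ds) ds
        = ds ++ ps.filterMap pvSgn := by
  induction ps with
  | nil => intro ds; simp
  | cons pc ps ih =>
    intro ds
    simp only [List.foldl_cons]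
    have hcons : List.filterMap pvSgn (pc :: ps)
        = (match pvSgn pc with | some d => [d] | none => []) ++ List.filterMap pvSgn ps := by
      cases h : pvSgn pc <;> simp [h]
    by_cases h1 : pc.2 > pc.1
    · rw [if_pos h1, ih, hcons]; simp [pvSgn, h1]
    · by_cases h2 : pc.2 < pc.1
      · rw [if_neg h1, if_pos h2, ih, hcons]; simp [pvSgn, h1, h2]
      · rw [if_neg h1, if_neg h2, ih, hcons]; simp [pvSgn, h1, h2]

lemma pvStepPair_sgn (st : String × Int × Int) (pc : Int × Int) :
    pvStepPair st pc = match pvSgn pc with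
      | some d => pvStepDir st d
      | none => st := by
  obtain ⟨t, c, u⟩ := st
  simp only [pvStepPair, pvStepDir, pvSgn]
  split_ifs <;> simp_all

lemma pvFoldPair_dirs (ps : List (Int × Int)) :
    ∀ st : String × Int × Int,
      ps.foldl pvStepPair st = (ps.filterMap pvSgn).foldl pvStepDir st := by
  induction ps with
  | nil => intro st; simp
  | cons pc ps ih =>
    intro st
    simp only [List.foldl_cons, List.filterMap_cons]
    rw [pvStepPair_sgn]
    cases h : pvSgn pc <;> simp [ih]

lemma pvSgn_mem (pc : Int × Int) (d : Int) (h : pvSgn pc = some d) : d = 1 ∨ d = -1 := by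
  simp only [pvSgn] at h
  split_ifs at h <;> simp_all

-- the core invariant: A's folded state is determined by B's run list
lemma pvInvariant (S : List Int) (hS : ∀ d ∈ S, d = 1 ∨ d = -1) :
    (∀ p ∈ S.foldl pvAddRun [], p.1 = 1 ∨ p.1 = -1) ∧
    S.foldl pvStepDir ("none", 0, 1)
      = (pvTrendStr (S.foldl pvAddRun []),
         pvCnt (S.foldl pvAddRun []).dropLast,
         pvLastLen (S.foldl pvAddRun [])) := by
  induction S using List.reverseRecOn with
  | nil => simp [pvTrendStr, pvCnt, pvLastLen]
  | append_singleton S d ih =>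
    have hS' : ∀ x ∈ S, x = 1 ∨ x = -1 := fun x hx => hS x (by simp [hx])
    have hd : d = 1 ∨ d = -1 := hS d (by simp)
    obtain ⟨hmem, hstate⟩ := ih hS'
    rw [List.foldl_append, List.foldl_append, hstate]
    set R := S.foldl pvAddRun [] with hR
    clear_value R
    simp only [List.foldl_cons, List.foldl_nil]
    cases hlast : R.getLast? with
    | none =>
      have hRnil : R = [] := List.getLast?_eq_none_iff.mp hlast
      subst hRnil
      constructor
      · intro p hp
        simp [pvAddRun] at hp
        simp [hp, hd]
      · rcases hd with hd | hd <;>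
          simp [hd, pvAddRun, pvStepDir, pvTrendStr, pvLastLen, pvCnt]
    | some dk =>
      obtain ⟨d0, k⟩ := dk
      have hRne : R ≠ [] := by
        intro h; rw [h] at hlast; simp at hlast
      have hd0 : d0 = 1 ∨ d0 = -1 := by
        have : (d0, k) ∈ R := List.mem_of_getLast? hlast
        exact hmem _ this
      have hsplit : R.dropLast ++ [(d0, k)] = R := by
        have := List.dropLast_append_getLast hRne
        rwa [List.getLast_eq_iff_getLast?_eq_some hRne |>.mpr hlast] at this
      by_cases hsame : d0 = d
      · -- same direction: trend unchanged, length bumped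
        have haddr : pvAddRun R d = R.dropLast ++ [(d0, k + 1)] := by
          simp [pvAddRun, hlast, hsame]
        constructor
        · intro p hp
          rw [haddr] at hp
          rcases List.mem_append.mp hp with hp | hp
          · exact hmem p (by rw [← hsplit]; exact List.mem_append.mpr (Or.inl hp))
          · simp at hp; rw [hp]; exact hd0
        · have htrend : pvTrendStr (R.dropLast ++ [(d0, k + 1)]) = pvTrendStr R := by
            simp [pvTrendStr, hlast]
          have hlen : pvLastLen (R.dropLast ++ [(d0, k + 1)]) = pvLastLen R + 1 := by
            simp [pvLastLen, hlast]
          have hcnt : pvCnt (R.dropLast ++ [(d0, k + 1)]).dropLast = pvCnt R.dropLast := by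
            simp
          have htr : pvTrendStr R = if d0 = 1 then "increasing" else "decreasing" := by
            simp [pvTrendStr, hlast]
          rw [haddr, htrend, hlen, hcnt, htr]
          subst hsame
          rcases hd with hd | hd <;> subst hd <;> simp [pvStepDir]
      · -- direction change: maybe count the finished run, start a new one
        have hd0d : d0 = -d := by rcases hd with hd | hd <;> rcases hd0 with hd0 <;> simp_all
        have haddr : pvAddRun R d = R ++ [(d, 1)] := by
          simp [pvAddRun, hlast, hsame]
        constructor
        · intro p hp
          rw [haddr] at hp
          rcases List.mem_append.mp hp with hp | hp
          · exact hmem p hp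
          · simp at hp; rw [hp]; exact hd
        · have htrend : pvTrendStr (R ++ [(d, 1)]) = (if d = 1 then "increasing" else "decreasing") := by
            simp [pvTrendStr]
          have hlen : pvLastLen (R ++ [(d, 1)]) = 2 := by
            simp [pvLastLen]
          have hdrop : (R ++ [(d, 1)]).dropLast = R := List.dropLast_concat ..
          have hcnt : pvCnt (R ++ [(d, 1)]).dropLast
              = pvCnt R.dropLast + (if 2 ≤ k then 1 else 0) := by
            rw [hdrop]
            conv_lhs => rw [← hsplit]
            by_cases h2 : 2 ≤ k <;>
              simp [pvCnt, List.filter_append, h2]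
          have htr : pvTrendStr R = if d0 = 1 then "increasing" else "decreasing" := by
            simp [pvTrendStr, hlast]
          have hll : pvLastLen R = k + 1 := by
            simp [pvLastLen, hlast]
          rw [haddr, htrend, hlen, hcnt, htr, hll]
          rcases hd with hd | hd <;> subst hd <;> rw [hd0d] <;>
            simp [pvStepDir] <;> split_ifs <;> simp

-- ===== VERDICT (by name: the statement is the Claim_ definition above) =====
theorem count_trend_changes_spec : Claim_equal_count_trend_changes := by
  intro arr _
  unfold Spec_count_trend_changes count_trend_changes count_trend_changes_alt
  by_cases h3 : arr.length < 3
  · simp [h3]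
  · simp only [h3, if_false]
    rw [pvFoldA_pairs, pvFoldPair_dirs]
    have hdirs : pvDirs arr = (arr.zip (arr.drop 1)).filterMap pvSgn := by
      unfold pvDirs
      rw [pvDirs_append]
      simp
    have hcl : ∀ d ∈ (arr.zip (arr.drop 1)).filterMap pvSgn, d = 1 ∨ d = -1 := by
      intro d hd
      obtain ⟨pc, _, hpc⟩ := List.mem_filterMap.mp hd
      exact pvSgn_mem pc d hpc
    obtain ⟨_, hstate⟩ := pvInvariant _ hcl
    rw [hstate, ← hdirs]
    rfl
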